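-- pv_equiv track=rewrite | github.com/FlyTweety/MiniDTM | vertical_federated_learning.py | to_array
-- ===== SOURCE A (Python) =====
-- def to_array(X_libsvm, file_name='adult'):
--     feature_num = 0
--     if file_name == 'adult':
--         feature_num = 123
--     res = []
--     for X in X_libsvm:
--         X_real = []
--         X = dict(X)
--         # 123 features
--         for i in range(1, feature_num + 1):
--             if X.get(i) != 1:
--                 X_real.append(0)
--             else:
--                 X_real.append(1)
--         res.append(X_real)
--     return res
-- ===== SOURCE B (Python) =====
-- def to_array(X_libsvm, file_name='adult'):
--     feature_num = 123 if file_name == 'adult' else 0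
--     res = []
--     for X in X_libsvm:
--         row = [0] * feature_num
--         for k, v in dict(X).items():
--             if v == 1 and 1 <= k <= feature_num:
--                 row[k - 1] = 1
--         res.append(row)
--     return res
-- ===== Notes on version B (the rewrite author's own statement) =====
-- stated objective: alternative
-- what changed: B pre-zeroes a dense row and scatters only the sparse entries present in the dict into it, instead of A's scan over every feature index with a dict.get per index.
import Mathlib
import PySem

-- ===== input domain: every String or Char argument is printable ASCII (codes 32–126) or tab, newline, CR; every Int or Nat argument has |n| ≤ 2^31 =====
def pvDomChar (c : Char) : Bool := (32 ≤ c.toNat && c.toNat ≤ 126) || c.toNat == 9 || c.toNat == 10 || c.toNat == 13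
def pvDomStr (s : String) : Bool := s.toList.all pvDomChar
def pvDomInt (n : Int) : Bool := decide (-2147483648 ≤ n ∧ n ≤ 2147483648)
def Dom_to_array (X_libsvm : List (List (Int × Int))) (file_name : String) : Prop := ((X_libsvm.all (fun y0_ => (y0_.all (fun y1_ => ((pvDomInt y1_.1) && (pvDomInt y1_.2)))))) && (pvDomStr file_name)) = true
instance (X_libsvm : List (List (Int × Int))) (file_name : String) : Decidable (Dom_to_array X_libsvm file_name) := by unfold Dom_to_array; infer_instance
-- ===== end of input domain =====

-- B pre-zeroes a dense row and scatters the sparse dict entries into it, instead of A's per-index dict.get scan (alternative decomposition, same asymptotic cost).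


-- ===== PORT A =====
def to_array (X_libsvm : List (List (Int × Int))) (file_name : String) : List (List Int) :=
  let feature_num : Int := if file_name == "adult" then 123 else 0
  X_libsvm.foldl (fun res X =>
    let d : PySem.Dict Int Int := PySem.Dict.ofList X
    let X_real : List Int := (PySem.List.pyRange 1 (feature_num + 1) 1).foldl
      (fun acc i => if d.get? i ≠ some 1 then acc ++ [(0 : Int)] else acc ++ [(1 : Int)]) []
    res ++ [X_real]) []

-- ===== PORT B =====
def to_array_alt (X_libsvm : List (List (Int × Int))) (file_name : String) : List (List Int) :=
  let feature_num : Int := if file_name == "adult" then 123 else 0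
  X_libsvm.map (fun X =>
    (PySem.Dict.ofList X).items.foldl
      (fun row kv =>
        if kv.2 = 1 ∧ 1 ≤ kv.1 ∧ kv.1 ≤ feature_num then row.set (kv.1 - 1).toNat 1 else row)
      (List.replicate feature_num.toNat (0 : Int)))

-- ===== PRECONDITION & SPEC =====
def Spec_to_array (X_libsvm : List (List (Int × Int))) (file_name : String) (out : List (List Int)) : Prop := out = to_array_alt X_libsvm file_name
instance (X_libsvm : List (List (Int × Int))) (file_name : String) (out : List (List Int)) : Decidable (Spec_to_array X_libsvm file_name out) := by unfold Spec_to_array; infer_instance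

-- ===== CLAIM (what is proved, stated in full; the proofs are below) =====
def Claim_equal_to_array : Prop := ∀ (X_libsvm : List (List (Int × Int))) (file_name : String), Dom_to_array X_libsvm file_name → Spec_to_array X_libsvm file_name (to_array X_libsvm file_name)

-- ===== LEMMAS AND PROOFS =====

-- B's scatter step, abbreviated for the lemmas below
def pvStep (n : Int) (row : List Int) (kv : Int × Int) : List Int :=
  if kv.2 = 1 ∧ 1 ≤ kv.1 ∧ kv.1 ≤ n then row.set (kv.1 - 1).toNat 1 else row

theorem pvStep_length (n : Int) (row : List Int) (kv : Int × Int) :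
    (pvStep n row kv).length = row.length := by
  unfold pvStep; split <;> simp

theorem pvFold_length (n : Int) (l : List (Int × Int)) (row : List Int) :
    (l.foldl (pvStep n) row).length = row.length := by
  induction l generalizing row with
  | nil => rfl
  | cons kv t ih => simp [List.foldl, ih, pvStep_length]

-- the scattered row reads 1 exactly where ((j:Int)+1, 1) occurs among the entries
theorem pvFold_getElem? (n : Int) (l : List (Int × Int)) (row : List Int) (j : Nat)
    (hj : j < row.length) (hjn : (j : Int) < n) :
    (l.foldl (pvStep n) row)[j]? =
      if ((j : Int) + 1, (1 : Int)) ∈ l then some 1 else row[j]? := by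
  induction l generalizing row with
  | nil => simp
  | cons kv t ih =>
    have hlen : (pvStep n row kv).length = row.length := pvStep_length n row kv
    have ihv := ih (pvStep n row kv) (by rw [hlen]; exact hj)
    simp only [List.foldl_cons, List.mem_cons]
    rw [ihv]
    by_cases ht : ((j : Int) + 1, (1 : Int)) ∈ t
    · simp [ht]
    · simp only [ht, if_false, or_false]
      by_cases hkv : kv = ((j : Int) + 1, (1 : Int))
      · subst hkv
        have hcond : ((1 : Int) = 1 ∧ 1 ≤ (j : Int) + 1 ∧ (j : Int) + 1 ≤ n) := by
          refine ⟨rfl, by omega, by omega⟩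
        have hidx : (((j : Int) + 1) - 1).toNat = j := by omega
        have hstep : pvStep n row ((j : Int) + 1, 1) = row.set j 1 := by
          unfold pvStep
          rw [if_pos hcond, hidx]
        rw [if_pos rfl, hstep]
        simp [hj]
      · rw [if_neg (fun h => hkv h.symm)]
        unfold pvStep
        split
        · next hc =>
          obtain ⟨hv1, hk1, hkn⟩ := hc
          have hne : (kv.1 - 1).toNat ≠ j := by
            intro he
            apply hkv
            have hk : kv.1 = (j : Int) + 1 := by omega
            obtain ⟨k, v⟩ := kv
            simp only at hv1 hk
            rw [hv1, hk]
          have hne' : kv.1.toNat - 1 ≠ j := by omega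
          simp [List.getElem?_set_ne hne']
        · next => rfl

-- A's inner loop is a map over the index range
theorem pvA_row_eq_map (g : Int → Option Int) (l : List Int) (acc : List Int) :
    l.foldl (fun acc i => if g i ≠ some 1 then acc ++ [(0 : Int)] else acc ++ [(1 : Int)]) acc =
      acc ++ l.map (fun i => if g i ≠ some 1 then (0 : Int) else 1) := by
  induction l generalizing acc with
  | nil => simp
  | cons x t ih =>
    simp only [List.foldl_cons, List.map_cons]
    rw [ih]
    split <;> simp

-- one row: A's dense scan equals B's sparse scatter
theorem pvRow_eq (X : List (Int × Int)) (n : Int) (hn : 0 ≤ n) :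
    (PySem.List.pyRange 1 (n + 1) 1).foldl
      (fun acc i => if (PySem.Dict.ofList X).get? i ≠ some 1 then acc ++ [(0 : Int)] else acc ++ [(1 : Int)]) []
    = (PySem.Dict.ofList X).items.foldl (pvStep n) (List.replicate n.toNat 0) := by
  rw [pvA_row_eq_map]
  apply List.ext_getElem?
  intro j
  by_cases hj : j < n.toNat
  · rw [pvFold_getElem? n _ _ j (by simpa using hj) (by omega)]
    have hjr : (List.replicate n.toNat (0 : Int))[j]? = some 0 := by
      simp [hj]
    rw [hjr]
    have hrange : ((PySem.List.pyRange 1 (n + 1) 1).map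
        (fun i => if (PySem.Dict.ofList X).get? i ≠ some 1 then (0 : Int) else 1))[j]? =
        some (if (PySem.Dict.ofList X).get? (1 + (j : Int)) ≠ some 1 then (0 : Int) else 1) := by
      rw [PySem.List.pyRange_one]
      have hj' : j < ((n + 1) - 1).toNat := by omega
      simp only [List.map_map]
      simp [List.getElem?_map]
      exact ⟨j, by simp [hj], rfl⟩
    rw [List.nil_append, hrange]
    have hmem : (PySem.Dict.ofList X).get? (1 + (j : Int)) = some 1 ↔
        ((j : Int) + 1, (1 : Int)) ∈ (PySem.Dict.ofList X).items := by
      rw [add_comm]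
      exact PySem.Dict.get?_eq_some_iff_mem_items _ _ _ (PySem.Dict.nodup_keys_ofList X)
    by_cases hm : ((j : Int) + 1, (1 : Int)) ∈ (PySem.Dict.ofList X).items
    · rw [if_pos hm, if_neg (by simp [hmem.mpr hm])]
    · rw [if_neg hm, if_pos (by rw [Ne, hmem]; exact hm)]
  · have h1 : ((PySem.List.pyRange 1 (n + 1) 1).map
        (fun i => if (PySem.Dict.ofList X).get? i ≠ some 1 then (0 : Int) else 1)).length ≤ j := by
      simp [PySem.List.length_pyRange_one]; omega
    have h2 : ((PySem.Dict.ofList X).items.foldl (pvStep n) (List.replicate n.toNat 0)).length ≤ j := by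
      rw [pvFold_length]; simp; omega
    rw [List.nil_append, List.getElem?_eq_none h1, List.getElem?_eq_none h2]

theorem to_array_spec : Claim_equal_to_array := by
  intro X_libsvm file_name _
  unfold Spec_to_array to_array to_array_alt
  rw [PySem.List.foldl_append_singleton_eq_map, List.nil_append]
  apply List.map_congr_left
  intro X _
  exact pvRow_eq X _ (by split <;> omega)
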